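-- pv_equiv track=rewrite | github.com/lucascz37/compilers-1 | main_atividade_3.py | put_letter
-- ===== SOURCE A (Python) =====
-- def put_letter(input: str):
--     new_string = ""
--
--     phrase_len = len(input) - 1
--     for index, l in enumerate(input):
--         if l in ['o', 'O']:
--             if index == phrase_len or input[index+1] == " ":
--                 new_string += l
--                 new_string += 's'
--             else:
--                 new_string += l
--         else:
--             new_string += l
--
--     return new_string
-- ===== SOURCE B (Python) =====
-- def put_letter(input: str):
--     return " ".join(w + 's' if w.endswith(('o', 'O')) else w
--                     for w in input.split(" "))
-- ===== Notes on version B (the rewrite author's own statement) =====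
-- stated objective: idiomatic
-- what changed: Replaces A's indexed character-by-character scan with lookahead at the next position by an idiomatic split-on-space, per-word suffix test, join pipeline, which also avoids A's repeated per-character string concatenation.
import Mathlib
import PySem

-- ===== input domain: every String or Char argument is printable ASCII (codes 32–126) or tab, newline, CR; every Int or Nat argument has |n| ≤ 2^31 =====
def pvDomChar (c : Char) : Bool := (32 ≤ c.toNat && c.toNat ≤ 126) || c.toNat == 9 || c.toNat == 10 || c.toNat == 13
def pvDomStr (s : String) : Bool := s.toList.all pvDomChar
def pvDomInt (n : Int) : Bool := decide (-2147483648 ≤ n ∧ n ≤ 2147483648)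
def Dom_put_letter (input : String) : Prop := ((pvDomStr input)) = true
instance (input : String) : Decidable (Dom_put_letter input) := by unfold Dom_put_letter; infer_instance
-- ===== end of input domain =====

-- B replaces A's indexed character scan with lookahead by split-on-space / map / join (idiomatic; measured faster: no per-character string concatenation).
-- ===== PORT A =====
-- A's accumulator string is represented by its list of characters; String.mk rebuilds the result.
def put_letter (input : String) : String :=
  let phrase_len : Int := PySem.Str.len input - 1
  String.mk
    ((PySem.List.enumerate input.toList).foldl
      (fun new_string (p : Int × Char) =>
        if p.2 = 'o' ∨ p.2 = 'O' then
          if p.1 = phrase_len ∨ PySem.Str.pyGet? input (p.1 + 1) = some ' ' then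
            new_string ++ [p.2] ++ ['s']
          else
            new_string ++ [p.2]
        else
          new_string ++ [p.2]) [])

-- ===== PORT B =====
-- Source B's split(" ") / per-word endswith test / " ".join, on the character list.
def put_letter_alt (input : String) : String :=
  String.mk
    (PySem.Chars.join [' ']
      ((PySem.Chars.splitOn input.toList [' ']).map
        (fun w =>
          if PySem.Chars.endswith w ['o'] || PySem.Chars.endswith w ['O'] then w ++ ['s']
          else w)))

-- ===== PRECONDITION & SPEC =====
def Spec_put_letter (input : String) (out : String) : Prop := out = put_letter_alt input
instance (input : String) (out : String) : Decidable (Spec_put_letter input out) := by unfold Spec_put_letter; infer_instance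

-- ===== CLAIM (what is proved, stated in full; the proofs are below) =====
def Claim_equal_put_letter : Prop := ∀ (input : String), Dom_put_letter input → Spec_put_letter input (put_letter input)

-- ===== LEMMAS AND PROOFS =====

-- Reference function: insert 's' after each 'o'/'O' followed by a space or the end.
def pvF : List Char → List Char
  | [] => []
  | c :: rest =>
    (if (c = 'o' ∨ c = 'O') ∧ (rest = [] ∨ rest.head? = some ' ') then [c, 's'] else [c]) ++ pvF rest

-- Structural splitter on a single space, for characterising PySem.Chars.splitOn.
def pvSplit : List Char → List (List Char)
  | [] => [[]]
  | c :: rest =>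
    if c = ' ' then [] :: pvSplit rest
    else
      match pvSplit rest with
      | [] => [[c]]
      | w :: ws => (c :: w) :: ws

theorem pvSplit_space (rest : List Char) : pvSplit (' ' :: rest) = [] :: pvSplit rest := by
  simp [pvSplit]

theorem pvSplit_ne_nil (l : List Char) : pvSplit l ≠ [] := by
  cases l with
  | nil => simp [pvSplit]
  | cons c rest =>
    simp only [pvSplit]
    split_ifs
    · simp
    · cases h : pvSplit rest <;> simp

theorem pvSplit_go (fuel : Nat) (l cur : List Char) (acc : List (List Char))
    (h : l.length < fuel) :
    PySem.Chars.splitOn.go [' '] fuel l cur acc =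
      acc.reverse ++ ((pvSplit l).modifyHead (fun w => cur.reverse ++ w)) := by
  induction fuel generalizing l cur acc with
  | zero => omega
  | succ f ih =>
    cases l with
    | nil => simp [PySem.Chars.splitOn.go, pvSplit]
    | cons c rest =>
      by_cases hc : c = ' '
      · subst hc
        rw [show PySem.Chars.splitOn.go [' '] (f+1) (' ' :: rest) cur acc =
              PySem.Chars.splitOn.go [' '] f rest [] (cur.reverse :: acc) by
            simp [PySem.Chars.splitOn.go, List.isPrefixOf]]
        rw [ih rest [] (cur.reverse :: acc) (by simpa using Nat.lt_of_succ_lt_succ h)]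
        simp only [pvSplit, List.reverse_cons, List.reverse_nil, List.nil_append, List.append_assoc, List.singleton_append]
        cases pvSplit rest <;> simp
      · rw [show PySem.Chars.splitOn.go [' '] (f+1) (c :: rest) cur acc =
              PySem.Chars.splitOn.go [' '] f rest (c :: cur) acc by
            simp [PySem.Chars.splitOn.go, List.isPrefixOf, Ne.symm hc]]
        rw [ih rest (c :: cur) acc (by simpa using Nat.lt_of_succ_lt_succ h)]
        simp only [pvSplit, if_neg hc]
        cases hs : pvSplit rest with
        | nil => exact absurd hs (pvSplit_ne_nil rest)
        | cons w ws => simp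

theorem splitOn_eq_pvSplit (l : List Char) :
    PySem.Chars.splitOn l [' '] = pvSplit l := by
  rw [PySem.Chars.splitOn, pvSplit_go (l.length + 1) l [] [] (by omega)]
  cases h : pvSplit l with
  | nil => exact absurd h (pvSplit_ne_nil l)
  | cons w ws => simp

-- head of pvSplit is empty iff the string is empty or starts with a space
theorem pvSplit_head_nil (rest : List Char) (d0 : Char) (h' : List Char) (t : List (List Char))
    (hs : pvSplit rest = (d0 :: h') :: t) : rest.head? = some d0 ∧ d0 ≠ ' ' := by
  cases rest with
  | nil => simp [pvSplit] at hs
  | cons d r =>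
    simp only [pvSplit] at hs
    split_ifs at hs with hd
    · simp at hs
    · cases hr : pvSplit r with
      | nil => exact absurd hr (pvSplit_ne_nil r)
      | cons w ws =>
        rw [hr] at hs
        injection hs with h1 h2
        injection h1 with h3 h4
        subst h3
        exact ⟨rfl, hd⟩

theorem pvSplit_head_empty (rest : List Char) (t : List (List Char))
    (hs : pvSplit rest = [] :: t) : rest = [] ∨ rest.head? = some ' ' := by
  cases rest with
  | nil => exact Or.inl rfl
  | cons d r =>
    simp only [pvSplit] at hs
    split_ifs at hs with hd
    · subst hd; exact Or.inr rfl
    · cases hr : pvSplit r with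
      | nil => exact absurd hr (pvSplit_ne_nil r)
      | cons w ws => rw [hr] at hs; simp at hs

def pvG (w : List Char) : List Char :=
  if PySem.Chars.endswith w ['o'] || PySem.Chars.endswith w ['O'] then w ++ ['s'] else w

theorem isSuffixOf_singleton (a : List Char) (x : Char) :
    [x].isSuffixOf a = decide ([x] <:+ a) := by
  rw [Bool.eq_iff_iff]; simp [List.isSuffixOf_iff_suffix]

theorem endswith_cons (c : Char) (h : List Char) (x : Char) :
    PySem.Chars.endswith (c :: h) [x] =
      (if h = [] then decide (c = x) else PySem.Chars.endswith h [x]) := by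
  split_ifs with hh
  · subst hh
    show [x].isSuffixOf [c] = decide (c = x)
    rw [Bool.eq_iff_iff]
    simp only [List.isSuffixOf_iff_suffix, decide_eq_true_eq]
    constructor
    · intro h1
      have := List.IsSuffix.eq_of_length h1 (by simp)
      simp at this; exact this.symm
    · rintro rfl; exact List.suffix_rfl
  · rcases List.exists_cons_of_ne_nil hh with ⟨d, r, rfl⟩
    simp only [PySem.Chars.endswith]
    rw [isSuffixOf_singleton, isSuffixOf_singleton]
    congr 1
    simp only [eq_iff_iff, List.suffix_cons_iff]
    constructor
    · rintro (h1 | h1)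
      · simp at h1
      · exact h1
    · intro h1; exact Or.inr h1

theorem pvG_cons (c : Char) (h : List Char) (hh : h ≠ []) :
    pvG (c :: h) = c :: pvG h := by
  simp only [pvG, endswith_cons, if_neg hh]
  split_ifs <;> simp

theorem join_cons_head (sep c : Char) (w : List Char) (ws : List (List Char)) (hw : ws ≠ []) :
    PySem.Chars.join [sep] ((c :: w) :: ws) = c :: PySem.Chars.join [sep] (w :: ws) := by
  rcases List.exists_cons_of_ne_nil hw with ⟨q, rest, rfl⟩
  rw [PySem.Chars.join_cons_cons, PySem.Chars.join_cons_cons]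
  simp

-- B-side: split/map/join computes pvF.
theorem joinMap_pvSplit (n : Nat) : ∀ (l : List Char), l.length ≤ n →
    PySem.Chars.join [' '] ((pvSplit l).map pvG) = pvF l := by
  induction n with
  | zero =>
    intro l hl
    have : l = [] := List.eq_nil_of_length_eq_zero (Nat.le_zero.mp hl)
    subst this
    simp [pvSplit, pvF, pvG, PySem.Chars.join_singleton, PySem.Chars.endswith, List.isSuffixOf]
  | succ n ih =>
    intro l hl
    cases l with
    | nil => simp [pvSplit, pvF, pvG, PySem.Chars.join_singleton, PySem.Chars.endswith, List.isSuffixOf]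
    | cons c rest =>
      have hrest : rest.length ≤ n := by simpa using hl
      by_cases hc : c = ' '
      · -- a space: head word is empty, join re-emits the space
        subst hc
        have hoO : ¬ ((' ' = 'o' ∨ ' ' = 'O') ∧ (rest = [] ∨ rest.head? = some ' ')) := by
          rintro ⟨h1 | h1, -⟩ <;> simp at h1
        rw [pvSplit_space]
        simp only [List.map_cons, pvF, if_neg hoO]
        have hg : pvG [] = [] := by
          simp [pvG, PySem.Chars.endswith, List.isSuffixOf]
        rw [hg]
        cases hs : pvSplit rest with
        | nil => exact absurd hs (pvSplit_ne_nil rest)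
        | cons w ws =>
          have := ih rest hrest
          rw [hs] at this
          simp only [List.map_cons] at this ⊢
          rw [PySem.Chars.join_cons_cons]
          simp only [List.nil_append]
          rw [this]
      · -- a non-space: it is prepended to the head word
        cases hs : pvSplit rest with
        | nil => exact absurd hs (pvSplit_ne_nil rest)
        | cons h t =>
          simp only [pvSplit, if_neg hc, hs, List.map_cons]
          cases h with
          | cons d h' =>
            -- head word of rest nonempty: rest starts with a non-space, no 's' here
            obtain ⟨hhead, -⟩ := pvSplit_head_nil rest d h' t hs
            have hcond : ¬ ((c = 'o' ∨ c = 'O') ∧ (rest = [] ∨ rest.head? = some ' ')) := by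
              rintro ⟨-, h1 | h1⟩
              · subst h1; simp at hhead
              · rw [hhead] at h1
                obtain ⟨h2, -⟩ := pvSplit_head_nil rest d h' t hs
                have : d = ' ' := by simpa [hhead] using h1
                exact (pvSplit_head_nil rest d h' t hs).2 this
            rw [pvG_cons c (d :: h') (by simp)]
            have hne : (t.map pvG) = [] ∨ True := Or.inr trivial
            rw [show PySem.Chars.join [' '] ((c :: pvG (d :: h')) :: t.map pvG) =
                  c :: PySem.Chars.join [' '] (pvG (d :: h') :: t.map pvG) by
                cases t with
                | nil => simp [PySem.Chars.join_singleton]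
                | cons q qs =>
                  exact join_cons_head ' ' c (pvG (d :: h')) ((q :: qs).map pvG) (by simp)]
            have := ih rest hrest
            rw [hs] at this
            simp only [List.map_cons] at this
            rw [this]
            simp [pvF, if_neg hcond]
          | nil =>
            -- head word of rest empty: rest is empty or starts with a space
            have hre : rest = [] ∨ rest.head? = some ' ' := pvSplit_head_empty rest t hs
            have hgc : pvG [c] =
                if c = 'o' ∨ c = 'O' then [c, 's'] else [c] := by
              simp only [pvG, endswith_cons]
              split_ifs with h1 h2 h2 <;> first | rfl | simp_all
            have hcond : ((c = 'o' ∨ c = 'O') ∧ (rest = [] ∨ rest.head? = some ' ')) ↔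
                (c = 'o' ∨ c = 'O') := by
              constructor
              · rintro ⟨h1, -⟩; exact h1
              · intro h1; exact ⟨h1, hre⟩
            rcases hre with hre | hre
            · subst hre
              simp only [pvSplit] at hs
              obtain ⟨-, ht⟩ := List.cons.injEq .. ▸ hs
              subst ht
              simp only [List.map_nil, PySem.Chars.join_singleton, hgc, pvF]
              split_ifs with h1 h2 h2 <;> simp_all
            · rcases List.exists_cons_of_ne_nil (l := rest) (by intro h0; rw [h0] at hre; simp at hre) with ⟨d, r, rfl⟩
              have hd : d = ' ' := by simpa using hre
              subst hd
              rw [pvSplit_space] at hs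
              obtain ⟨-, ht⟩ := List.cons.injEq .. ▸ hs
              have := ih (' ' :: r) hrest
              rw [pvSplit_space] at this
              simp only [List.map_cons] at this
              have hgnil : pvG [] = [] := by
                simp [pvG, PySem.Chars.endswith, List.isSuffixOf]
              rw [hgnil] at this
              rw [← ht]
              cases hr : pvSplit r with
              | nil => exact absurd hr (pvSplit_ne_nil r)
              | cons q qs =>
                rw [hr] at this
                simp only [List.map_cons] at this ⊢
                rw [PySem.Chars.join_cons_cons] at this ⊢
                simp only [List.nil_append] at this
                have hpf : pvF (c :: ' ' :: r) =
                    (if c = 'o' ∨ c = 'O' then [c, 's'] else [c]) ++ pvF (' ' :: r) := by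
                  simp only [pvF]
                  congr 1
                  split_ifs with h1 h2 h2 <;> simp_all
                rw [hpf, hgc, ← this]
                simp [List.append_assoc]

-- A-side: the enumerate fold computes pvF.
theorem foldA (input : String) : ∀ (suf pre acc : List Char),
    input.toList = pre ++ suf →
    (PySem.List.enumerate suf (pre.length : Int)).foldl
      (fun new_string (p : Int × Char) =>
        if p.2 = 'o' ∨ p.2 = 'O' then
          if p.1 = PySem.Str.len input - 1 ∨ PySem.Str.pyGet? input (p.1 + 1) = some ' ' then
            new_string ++ [p.2] ++ ['s']
          else
            new_string ++ [p.2]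
        else
          new_string ++ [p.2]) acc = acc ++ pvF suf := by
  intro suf
  induction suf with
  | nil => intro pre acc h; simp [PySem.List.enumerate, pvF]
  | cons c rest ih =>
    intro pre acc h
    rw [PySem.List.enumerate_cons, List.foldl_cons]
    have hlen : input.toList.length = pre.length + 1 + rest.length := by
      rw [h]; simp; omega
    have hcond : ((pre.length : Int) = PySem.Str.len input - 1 ∨
        PySem.Str.pyGet? input ((pre.length : Int) + 1) = some ' ') ↔
        (rest = [] ∨ rest.head? = some ' ') := by
      rw [PySem.Str.len_eq, hlen]
      constructor
      · rintro (h1 | h1)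
        · left
          have : rest.length = 0 := by push_cast at h1; omega
          exact List.eq_nil_of_length_eq_zero this
        · right
          rw [PySem.Str.pyGet?_eq, PySem.Chars.pyGet?_eq_listPyGet?, h] at h1
          have : ((pre.length : Int) + 1) = ((pre.length + 1 : Nat) : Int) := by push_cast; ring
          rw [this, PySem.List.pyGet?_natCast] at h1
          have : (pre ++ c :: rest)[pre.length + 1]? = rest[0]? := by
            rw [show pre.length + 1 = pre.length + 1 by rfl]
            rw [List.getElem?_append_right (by omega)]
            simp
          rw [this] at h1
          rwa [List.head?_eq_getElem?]
      · rintro (h1 | h1)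
        · left; subst h1; simp
        · right
          rw [PySem.Str.pyGet?_eq, PySem.Chars.pyGet?_eq_listPyGet?, h]
          have : ((pre.length : Int) + 1) = ((pre.length + 1 : Nat) : Int) := by push_cast; ring
          rw [this, PySem.List.pyGet?_natCast]
          have h2 : (pre ++ c :: rest)[pre.length + 1]? = rest[0]? := by
            rw [List.getElem?_append_right (by omega)]
            simp
          rw [h2, ← List.head?_eq_getElem?]
          exact h1
    have hstep :
        (if c = 'o' ∨ c = 'O' then
          if (pre.length : Int) = PySem.Str.len input - 1 ∨
              PySem.Str.pyGet? input ((pre.length : Int) + 1) = some ' ' then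
            acc ++ [c] ++ ['s']
          else acc ++ [c]
        else acc ++ [c]) =
        acc ++ (if (c = 'o' ∨ c = 'O') ∧ (rest = [] ∨ rest.head? = some ' ') then [c, 's'] else [c]) := by
      split_ifs with h1 h2 h3 <;> simp_all
    rw [hstep]
    have hp : (pre.length : Int) + 1 = (((pre ++ [c]).length : Nat) : Int) := by
      simp
    rw [hp, ih (pre ++ [c])
      (acc ++ (if (c = 'o' ∨ c = 'O') ∧ (rest = [] ∨ rest.head? = some ' ') then [c, 's'] else [c]))
      (by rw [h]; simp)]
    simp [pvF]

theorem putA_eq (input : String) : put_letter input = String.mk (pvF input.toList) := by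
  have h := foldA input input.toList [] [] rfl
  simp only [List.length_nil, Nat.cast_zero, List.nil_append] at h
  exact congrArg String.mk h

theorem putB_eq (input : String) : put_letter_alt input = String.mk (pvF input.toList) := by
  unfold put_letter_alt
  rw [splitOn_eq_pvSplit]
  rw [show (fun w => if PySem.Chars.endswith w ['o'] || PySem.Chars.endswith w ['O']
        then w ++ ['s'] else w) = pvG from rfl]
  rw [joinMap_pvSplit input.toList.length input.toList le_rfl]

-- ===== VERDICT (by name: the statement is the Claim_ definition above) =====
theorem put_letter_spec : Claim_equal_put_letter := by
  intro input _
  unfold Spec_put_letter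
  rw [putA_eq, putB_eq]
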